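-- pv_equiv track=rewrite | github.com/priyanshu-profile/MEDIATOR | MEDIATOR/preference_data/final_pref_dataset_gen.py | _squash_repeats
-- ===== SOURCE A (Python) =====
-- MAX_TOKEN_REPEAT = 3
--
-- def _squash_repeats(text: str, max_repeat=MAX_TOKEN_REPEAT) -> str:
--     toks = text.split()
--     out, last, run = [], None, 0
--     for t in toks:
--         if t == last:
--             run += 1
--             if run <= max_repeat: out.append(t)
--         else:
--             last, run = t, 1
--             out.append(t)
--     return " ".join(out)
-- ===== SOURCE B (Python) =====
-- MAX_TOKEN_REPEAT = 3
--
-- def _squash_repeats(text: str, max_repeat=MAX_TOKEN_REPEAT) -> str: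
--     toks = text.split()
--     cap = max(max_repeat, 1)  # every run keeps at least its first token, as a dedupe should
--     out = []
--     while toks:
--         t = toks[0]
--         k = 1
--         while k < len(toks) and toks[k] == t:
--             k += 1
--         out += [t] * min(k, cap)
--         toks = toks[k:]
--     return " ".join(out)
-- ===== Notes on version B (the rewrite author's own statement) =====
-- stated objective: alternative
-- what changed: Replaces A's per-token state machine (last token + running repeat counter, conditional append per element) by run-at-a-time scanning: find each maximal run of equal tokens, emit min(run_length, max(max_repeat,1)) copies at once, then skip the whole run.
import Mathlib
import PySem

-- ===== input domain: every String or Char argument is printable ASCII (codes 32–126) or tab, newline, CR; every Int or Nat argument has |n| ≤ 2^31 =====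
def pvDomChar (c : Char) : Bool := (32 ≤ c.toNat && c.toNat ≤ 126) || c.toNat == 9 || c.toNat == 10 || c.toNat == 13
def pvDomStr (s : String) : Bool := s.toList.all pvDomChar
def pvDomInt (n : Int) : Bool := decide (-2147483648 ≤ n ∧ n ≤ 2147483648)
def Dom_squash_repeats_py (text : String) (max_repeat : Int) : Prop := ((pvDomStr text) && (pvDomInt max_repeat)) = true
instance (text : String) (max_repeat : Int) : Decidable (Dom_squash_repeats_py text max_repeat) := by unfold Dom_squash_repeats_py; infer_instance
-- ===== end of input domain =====

-- B replaces A's per-token last/run state machine by run-at-a-time scanning (find each maximal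
-- run, emit min(run, cap) copies, skip it); objective: alternative decomposition, same cost.

-- ===== PORT A =====
-- one step of A's for-loop; state = (out, last, run)
def pvStepA (max_repeat : Int) (s : List String × Option String × Int) (t : String) :
    List String × Option String × Int :=
  let (out, last, run) := s
  if some t = last then
    let run := run + 1
    if run ≤ max_repeat then (out ++ [t], last, run) else (out, last, run)
  else
    (out ++ [t], some t, 1)

def squash_repeats_py (text : String) (max_repeat : Int) : String :=
  let toks := PySem.Str.split₀ text
  let st := toks.foldl (pvStepA max_repeat) ([], none, 0)
  PySem.Str.join " " st.1

-- ===== PORT B =====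
-- B's outer while-loop: take the leading run (inner while = takeWhile count), emit a capped
-- number of copies, continue on the rest (toks[k:] = dropWhile, since toks[1:k] all equal t)
def pvRunsB (cap : Int) : List String → List String
  | [] => []
  | t :: rest =>
      let k : Nat := 1 + (rest.takeWhile (fun x => x == t)).length
      List.replicate (min (k : Int) cap).toNat t ++
        pvRunsB cap (rest.dropWhile (fun x => x == t))
termination_by l => l.length
decreasing_by
  simp only [List.length_cons]
  exact Nat.lt_succ_of_le (List.length_dropWhile_le _ _)

def squash_repeats_py_alt (text : String) (max_repeat : Int) : String :=
  let toks := PySem.Str.split₀ text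
  let cap := max max_repeat 1
  PySem.Str.join " " (pvRunsB cap toks)

-- ===== PRECONDITION & SPEC =====
def Spec_squash_repeats_py (text : String) (max_repeat : Int) (out : String) : Prop := out = squash_repeats_py_alt text max_repeat
instance (text : String) (max_repeat : Int) (out : String) : Decidable (Spec_squash_repeats_py text max_repeat out) := by unfold Spec_squash_repeats_py; infer_instance

-- ===== CLAIM (what is proved, stated in full; the proofs are below) =====
def Claim_equal_squash_repeats_py : Prop := ∀ (text : String) (max_repeat : Int), Dom_squash_repeats_py text max_repeat → Spec_squash_repeats_py text max_repeat (squash_repeats_py text max_repeat)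

-- ===== LEMMAS AND PROOFS =====

-- folding A's step over j further copies of the current token t
lemma pvFoldA_run (m : Int) (t : String) :
    ∀ (j : Nat) (out : List String) (r : Int), 1 ≤ r →
      List.foldl (pvStepA m) (out, some t, r) (List.replicate j t)
        = (out ++ List.replicate (min (r + j) m - min r m).toNat t, some t, r + j) := by
  intro j
  induction j with
  | zero => intro out r hr; simp
  | succ j ih =>
      intro out r hr
      rw [List.replicate_succ, List.foldl_cons]
      have hstep : pvStepA m (out, some t, r) t
          = if r + 1 ≤ m then (out ++ [t], some t, r + 1) else (out, some t, r + 1) := by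
        simp [pvStepA]
      by_cases h : r + 1 ≤ m
      · rw [hstep, if_pos h, ih _ (r + 1) (by omega)]
        have harith : r + 1 + (j : Int) = r + ((j + 1 : Nat) : Int) := by push_cast; ring
        have hlist : out ++ [t]
              ++ List.replicate (min (r + 1 + (j : Int)) m - min (r + 1) m).toNat t
            = out ++ List.replicate (min (r + ((j + 1 : Nat) : Int)) m - min r m).toNat t := by
          have hc : (min (r + ((j + 1 : Nat) : Int)) m - min r m).toNat
              = (min (r + 1 + (j : Int)) m - min (r + 1) m).toNat + 1 := by push_cast; omega
          rw [hc, List.replicate_succ]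
          simp
        rw [hlist, harith]
      · rw [hstep, if_neg h, ih _ (r + 1) (by omega)]
        have harith : r + 1 + (j : Int) = r + ((j + 1 : Nat) : Int) := by push_cast; ring
        have hc : (min (r + 1 + (j : Int)) m - min (r + 1) m).toNat
            = (min (r + ((j + 1 : Nat) : Int)) m - min r m).toNat := by push_cast; omega
        rw [hc, harith]

lemma pvTakeWhile_eq_replicate (t : String) (l : List String) :
    l.takeWhile (fun x => x == t) = List.replicate (l.takeWhile (fun x => x == t)).length t := by
  apply List.eq_replicate_of_mem
  intro b hb
  have := List.mem_takeWhile_imp hb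
  simpa using this

lemma pvDropWhile_head (t : String) (l : List String) (h : String)
    (hh : (l.dropWhile (fun x => x == t)).head? = some h) : h ≠ t := by
  have := List.head?_dropWhile_not (fun x => x == t) l
  rw [hh] at this
  simpa using this

-- main run-decomposition invariant: A's fold from a run boundary produces B's runs
lemma pvMain (m : Int) :
    ∀ (n : Nat) (l : List String), l.length ≤ n →
      ∀ (out : List String) (last : Option String) (r : Int),
        (∀ h, l.head? = some h → some h ≠ last) →
        (List.foldl (pvStepA m) (out, last, r) l).1 = out ++ pvRunsB (max m 1) l := by
  intro n
  induction n with
  | zero =>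
      intro l hl out last r _
      have : l = [] := List.eq_nil_of_length_eq_zero (Nat.le_zero.mp hl)
      subst this; simp [pvRunsB]
  | succ n ih =>
      intro l hl out last r hhead
      cases l with
      | nil => simp [pvRunsB]
      | cons t rest =>
          have hne : some t ≠ last := hhead t rfl
          rw [List.foldl_cons]
          have hstep : pvStepA m (out, last, r) t = (out ++ [t], some t, 1) := by
            simp [pvStepA, if_neg hne]
          rw [hstep]
          set k := (rest.takeWhile (fun x => x == t)).length with hk
          have hdecomp : rest = List.replicate k t ++ rest.dropWhile (fun x => x == t) := by
            conv_lhs => rw [← List.takeWhile_append_dropWhile (p := fun x => x == t) (l := rest)]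
            rw [← pvTakeWhile_eq_replicate]
          conv_lhs => rw [hdecomp]
          rw [List.foldl_append, pvFoldA_run m t k _ 1 le_rfl]
          have hlen : (rest.dropWhile (fun x => x == t)).length ≤ n := by
            have h1 := List.length_dropWhile_le (fun x => x == t) rest
            have : rest.length ≤ n := by simpa using Nat.succ_le_succ_iff.mp hl
            omega
          rw [ih _ hlen _ (some t) (1 + k)
                (by
                  intro h hh hcontra
                  exact pvDropWhile_head t rest h hh (by simpa using hcontra))]
          conv_rhs => rw [pvRunsB]
          simp only [← hk]
          have hc : (min (((1 + k : Nat) : Int)) (max m 1)).toNat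
              = (min ((1 : Int) + (k : Int)) m - min 1 m).toNat + 1 := by push_cast; omega
          rw [hc, List.replicate_succ]
          simp [List.append_assoc]

-- ===== VERDICT (by name: the statement is the Claim_ definition above) =====
theorem squash_repeats_py_spec : Claim_equal_squash_repeats_py := by
  intro text max_repeat _
  unfold Spec_squash_repeats_py squash_repeats_py squash_repeats_py_alt
  show PySem.Str.join " " (List.foldl (pvStepA max_repeat) ([], none, 0) (PySem.Str.split₀ text)).1
      = PySem.Str.join " " (pvRunsB (max max_repeat 1) (PySem.Str.split₀ text))
  refine congrArg (PySem.Str.join " ") ?_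
  simpa using pvMain max_repeat (PySem.Str.split₀ text).length _ le_rfl [] none 0
    (by intro h hc; simp)
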